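-- pv_equiv track=rewrite | github.com/bmuralid/Pure-Fortran | xproc_dep.py | _strip_string_literals
-- ===== SOURCE A (Python) =====
-- def _strip_string_literals(stmt: str) -> str:
--     """Replace content inside single/double quotes with spaces (keep length)."""
--     out = list(stmt)
--     in_single = False
--     in_double = False
--     i = 0
--     while i < len(out):
--         ch = out[i]
--         if ch == "'" and not in_double:
--             in_single = not in_single
--             i += 1
--             continue
--         if ch == '"' and not in_single:
--             in_double = not in_double
--             i += 1
--             continue
--         if in_single or in_double:
--             # Keep quotes, blank out interior.
--             if ch not in ("'", '"'):
--                 out[i] = " "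
--         i += 1
--     return "".join(out)
-- ===== SOURCE B (Python) =====
-- def _strip_string_literals(stmt: str) -> str:
--     """Replace content inside single/double quotes with spaces (keep length)."""
--     out = []
--     n = len(stmt)
--     i = 0
--     while i < n:
--         ch = stmt[i]
--         if ch in ("'", '"'):
--             out.append(ch)
--             j = stmt.find(ch, i + 1)
--             end = n if j == -1 else j
--             for c in stmt[i + 1:end]:
--                 out.append(c if c in ("'", '"') else " ")
--             if j == -1:
--                 i = n
--             else:
--                 out.append(ch)
--                 i = j + 1
--         else:
--             out.append(ch)
--             i += 1
--     return "".join(out)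
-- ===== Notes on version B (the rewrite author's own statement) =====
-- stated objective: alternative
-- what changed: B replaces A's per-character state machine (in_single/in_double flags toggled on each char) with a cursor-and-find decomposition: on an opening quote it locates the matching same-type closer with str.find and blanks the whole interior span at once, copying non-literal characters directly.
import Mathlib
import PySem

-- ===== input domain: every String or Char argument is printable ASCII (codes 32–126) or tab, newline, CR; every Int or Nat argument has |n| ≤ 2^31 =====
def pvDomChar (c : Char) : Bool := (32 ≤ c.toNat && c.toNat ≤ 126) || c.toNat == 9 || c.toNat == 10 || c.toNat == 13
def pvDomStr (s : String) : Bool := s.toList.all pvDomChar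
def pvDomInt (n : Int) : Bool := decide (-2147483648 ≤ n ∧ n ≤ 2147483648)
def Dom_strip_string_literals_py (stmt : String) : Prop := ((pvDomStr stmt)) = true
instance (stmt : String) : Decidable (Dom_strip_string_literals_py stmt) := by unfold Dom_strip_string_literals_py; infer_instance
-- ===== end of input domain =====

-- B replaces A's per-character in_single/in_double state machine by a cursor-and-find
-- decomposition (jump to the matching same-type closing quote, blank the interior span);
-- objective: alternative structure, same O(n) cost.

-- ===== PORT A =====
-- A's while-loop over indices with flags in_single/in_double, as structural recursion
-- over the remaining characters carrying the same two flags; branches in A's order.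
def stripA : List Char → Bool → Bool → List Char
  | [], _, _ => []
  | ch :: rest, in_single, in_double =>
    if ch = '\'' ∧ ¬ in_double then
      ch :: stripA rest (!in_single) in_double
    else if ch = '"' ∧ ¬ in_single then
      ch :: stripA rest in_single (!in_double)
    else if in_single ∨ in_double then
      (if ¬ (ch = '\'' ∨ ch = '"') then ' ' else ch) :: stripA rest in_single in_double
    else
      ch :: stripA rest in_single in_double

def strip_string_literals_py (stmt : String) : String :=
  String.mk (stripA stmt.toList false false)

-- ===== PORT B =====
-- stmt.find(ch, i+1) on the tail: split at the first occurrence of q, if any.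
def splitQ (q : Char) : List Char → Option (List Char × List Char)
  | [] => none
  | c :: cs =>
    if c = q then some ([], cs)
    else (splitQ q cs).map (fun p => (c :: p.1, p.2))

theorem splitQ_len {q : Char} : ∀ {l a b : List Char},
    splitQ q l = some (a, b) → b.length < l.length := by
  intro l
  induction l with
  | nil => intro a b h; simp [splitQ] at h
  | cons c cs ih =>
    intro a b h
    simp only [splitQ] at h
    split at h
    · simp at h
      simp [← h.2]
    · cases hs : splitQ q cs with
      | none => rw [hs] at h; simp at h
      | some p =>
        rw [hs] at h; simp at h
        have := ih (a := p.1) (b := p.2) (by rw [hs])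
        simp [← h.2]
        omega

-- blank the interior: keep quote characters of either type, space otherwise.
def blankInner (l : List Char) : List Char :=
  l.map (fun c => if c = '\'' ∨ c = '"' then c else ' ')

def stripB : List Char → List Char
  | [] => []
  | c :: rest =>
    if c = '\'' ∨ c = '"' then
      match h : splitQ c rest with
      | some (inner, after) => c :: (blankInner inner ++ c :: stripB after)
      | none => c :: blankInner rest
    else
      c :: stripB rest
termination_by l => l.length
decreasing_by
  · exact Nat.lt_succ_of_lt (splitQ_len h)
  · simp

def strip_string_literals_py_alt (stmt : String) : String :=
  String.mk (stripB stmt.toList)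

-- ===== PRECONDITION & SPEC =====
def Spec_strip_string_literals_py (stmt : String) (out : String) : Prop := out = strip_string_literals_py_alt stmt
instance (stmt : String) (out : String) : Decidable (Spec_strip_string_literals_py stmt out) := by unfold Spec_strip_string_literals_py; infer_instance

-- ===== CLAIM (what is proved, stated in full; the proofs are below) =====
def Claim_equal_strip_string_literals_py : Prop := ∀ (stmt : String), Dom_strip_string_literals_py stmt → Spec_strip_string_literals_py stmt (strip_string_literals_py stmt)

-- ===== LEMMAS AND PROOFS =====

theorem splitQ_none {q : Char} : ∀ {l : List Char}, splitQ q l = none → q ∉ l := by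
  intro l
  induction l with
  | nil => simp
  | cons c cs ih =>
    intro h
    simp only [splitQ] at h
    split at h
    · simp at h
    · rename_i hqc
      cases hs : splitQ q cs with
      | none =>
        simp [List.mem_cons]
        exact ⟨fun e => hqc e.symm, fun m => (ih hs) m⟩
      | some p => rw [hs] at h; simp at h

theorem splitQ_some {q : Char} : ∀ {l a b : List Char},
    splitQ q l = some (a, b) → l = a ++ q :: b ∧ q ∉ a := by
  intro l
  induction l with
  | nil => intro a b h; simp [splitQ] at h
  | cons c cs ih =>
    intro a b h
    simp only [splitQ] at h
    split at h
    · rename_i hc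
      simp at h
      obtain ⟨h1, h2⟩ := h
      subst hc; subst h1; subst h2
      simp
    · rename_i hc
      cases hs : splitQ q cs with
      | none => rw [hs] at h; simp at h
      | some p =>
        rw [hs] at h; simp at h
        obtain ⟨hl, hq⟩ := ih (a := p.1) (b := p.2) (by rw [hs])
        constructor
        · rw [← h.1, ← h.2]; simp [hl]
        · rw [← h.1]
          simp [List.mem_cons, hq]
          exact fun e => hc e.symm

-- Inside a single-quoted literal, with no closing ' in l, A blanks the rest of l.
theorem stripA_inside : ∀ (q : Char) (l : List Char), (q = '\'' ∨ q = '"') → q ∉ l →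
    stripA l (q = '\'') (q = '"') = blankInner l := by
  intro q l hq hnot
  induction l with
  | nil => simp [stripA, blankInner]
  | cons c cs ih =>
    have hc : c ≠ q := fun e => hnot (e ▸ List.mem_cons_self ..)
    have hcs : q ∉ cs := fun m => hnot (List.mem_cons_of_mem _ m)
    rcases hq with hq | hq <;> subst hq <;>
    · simp only [stripA, blankInner, List.map]
      by_cases h1 : c = '\'' <;> by_cases h2 : c = '"' <;>
        simp_all [blankInner]

-- Crossing an opening quote q: A processes inner (no q) blanking it, then the closing
-- q flips the flag back and the tail restarts in the neutral state.
theorem stripA_span : ∀ (q : Char) (inner after : List Char), (q = '\'' ∨ q = '"') →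
    q ∉ inner →
    stripA (inner ++ q :: after) (q = '\'') (q = '"') =
      blankInner inner ++ q :: stripA after false false := by
  intro q inner after hq hnot
  induction inner with
  | nil =>
    rcases hq with hq | hq <;> subst hq <;> simp [stripA, blankInner]
  | cons c cs ih =>
    have hc : c ≠ q := fun e => hnot (e ▸ List.mem_cons_self ..)
    have hcs : q ∉ cs := fun m => hnot (List.mem_cons_of_mem _ m)
    rcases hq with hq | hq <;> subst hq <;>
    · simp only [List.cons_append, stripA, blankInner, List.map]
      by_cases h1 : c = '\'' <;> by_cases h2 : c = '"' <;>
        simp_all [blankInner]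

-- unfold stripB on an opening quote whose closer exists / does not exist
theorem stripB_quote_some {c : Char} {rest inner after : List Char}
    (hq : c = '\'' ∨ c = '"') (hs : splitQ c rest = some (inner, after)) :
    stripB (c :: rest) = c :: (blankInner inner ++ c :: stripB after) := by
  rw [stripB, if_pos hq]
  split
  · rename_i inner' after' h'
    rw [hs] at h'
    simp at h'
    rw [h'.1, h'.2]
  · rename_i h'
    rw [hs] at h'
    simp at h'

theorem stripB_quote_none {c : Char} {rest : List Char}
    (hq : c = '\'' ∨ c = '"') (hs : splitQ c rest = none) :
    stripB (c :: rest) = c :: blankInner rest := by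
  rw [stripB, if_pos hq]
  split
  · rename_i inner' after' h'
    rw [hs] at h'
    simp at h'
  · rfl

theorem stripA_eq_stripB : ∀ (l : List Char), stripA l false false = stripB l := by
  intro l
  induction l using stripB.induct with
  | case1 => simp [stripA, stripB]
  | case2 c rest hq inner after hs ih =>
    obtain ⟨hl, hni⟩ := splitQ_some hs
    rw [stripB_quote_some hq hs]
    rcases hq with hq | hq <;> subst hq <;>
      [ (have hspan := stripA_span '\'' inner after (Or.inl rfl) hni);
        (have hspan := stripA_span '"' inner after (Or.inr rfl) hni) ] <;>
      simp at hspan <;>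
    · rw [hl]
      simp only [stripA]
      simp
      rw [hspan, ih]
  | case3 c rest hq hs =>
    have hni := splitQ_none hs
    rw [stripB_quote_none hq hs]
    rcases hq with hq | hq <;> subst hq <;>
      [ (have hins := stripA_inside '\'' rest (Or.inl rfl) hni);
        (have hins := stripA_inside '"' rest (Or.inr rfl) hni) ] <;>
      simp at hins <;>
    · simp only [stripA]
      simp
      rw [hins]
  | case4 c rest hq ih =>
    have h1 : ¬ c = '\'' := fun e => hq (Or.inl e)
    have h2 : ¬ c = '"' := fun e => hq (Or.inr e)
    simp only [stripA, h1, h2, false_and, if_false, or_self, stripB, if_neg hq,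
               Bool.false_eq_true, ih]

-- ===== VERDICT (by name: the statement is the Claim_ definition above) =====
theorem strip_string_literals_py_spec : Claim_equal_strip_string_literals_py := by
  intro stmt _
  unfold Spec_strip_string_literals_py strip_string_literals_py strip_string_literals_py_alt
  rw [stripA_eq_stripB]
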